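-- pv_equiv track=rewrite | github.com/Corentin-Lcs/nsi-practical-exams | 2022/Corrigés.py | depouille
-- ===== SOURCE A (Python) =====
-- def depouille(urne):
--     resultat = dict()
--     for bulletin in urne:
--         if bulletin in resultat:
--             resultat[bulletin] = resultat[bulletin] + 1
--         else:
--             resultat[bulletin] = 1
--     return resultat
-- ===== SOURCE B (Python) =====
-- def depouille(urne):
--     return {b: urne.count(b) for b in set(urne)}
-- ===== Notes on version B (the rewrite author's own statement) =====
-- stated objective: idiomatic
-- what changed: Replaces the incremental one-pass dict-building loop with a comprehension over the distinct ballots, rescanning the list with urne.count per key.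
import Mathlib
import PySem

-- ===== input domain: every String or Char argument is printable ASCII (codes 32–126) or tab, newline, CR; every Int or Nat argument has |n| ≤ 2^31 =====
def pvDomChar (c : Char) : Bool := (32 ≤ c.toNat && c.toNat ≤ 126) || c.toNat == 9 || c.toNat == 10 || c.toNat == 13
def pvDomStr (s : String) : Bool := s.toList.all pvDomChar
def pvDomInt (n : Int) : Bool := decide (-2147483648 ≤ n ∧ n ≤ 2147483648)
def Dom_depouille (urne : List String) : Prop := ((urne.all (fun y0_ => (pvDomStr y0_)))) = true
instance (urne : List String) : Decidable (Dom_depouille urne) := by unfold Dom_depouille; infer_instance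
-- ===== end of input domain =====

-- B replaces A's incremental dict-building loop by a comprehension over the distinct ballots with a per-key rescan (urne.count); objective: idiomatic, not faster.


-- ===== PORT A =====
-- Port of A: build a dict incrementally (if key present, +1, else set to 1), return its items.
def depouille (urne : List String) : List (String × Int) :=
  (urne.foldl (fun resultat bulletin =>
      if resultat.contains bulletin then
        resultat.insert bulletin (resultat.getD bulletin 0 + 1)
      else
        resultat.insert bulletin 1)
    (PySem.Dict.empty)).items

-- ===== PORT B =====
-- Port of B: dict comprehension over the distinct ballots, counting each by a rescan.
def depouille_alt (urne : List String) : List (String × Int) :=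
  (PySem.Set.ofList urne).map (fun b => (b, (urne.count b : Int)))

-- ===== PRECONDITION & SPEC =====
def Spec_depouille (urne : List String) (out : List (String × Int)) : Prop := out = depouille_alt urne
instance (urne : List String) (out : List (String × Int)) : Decidable (Spec_depouille urne out) := by unfold Spec_depouille; infer_instance

-- ===== CLAIM (what is proved, stated in full; the proofs are below) =====
def Claim_equal_depouille : Prop := ∀ (urne : List String), Dom_depouille urne → Spec_depouille urne (depouille urne)

-- ===== LEMMAS AND PROOFS =====

-- A's loop body equals the unconditional insert-with-increment body.
theorem depouille_foldl_eq (urne : List String) :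
    urne.foldl (fun resultat bulletin =>
      if resultat.contains bulletin then
        resultat.insert bulletin (resultat.getD bulletin 0 + 1)
      else
        resultat.insert bulletin 1) (PySem.Dict.empty : PySem.Dict String Int)
    = urne.foldl (fun d x => d.insert x (d.getD x 0 + 1)) PySem.Dict.empty := by
  apply PySem.List.foldl_congr_mem
  intro d x _
  by_cases h : d.contains x
  · simp [h]
  · rw [if_neg h, PySem.Dict.getD_of_not_contains (h := by simpa using h)]; norm_num

-- ===== VERDICT (by name: the statement is the Claim_ definition above) =====
theorem depouille_spec : Claim_equal_depouille := by
  intro urne _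
  unfold Spec_depouille depouille depouille_alt
  rw [depouille_foldl_eq, PySem.Dict.foldl_insert_getD_add_one_eq_counter, PySem.Dict.items_counter]
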